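-- pv_equiv track=rewrite | github.com/981377660LMT/algorithm-study | 9_排序和搜索/经典题/自定义比较函数/尽可能装满篮子的最小代价.py | solve
-- ===== SOURCE A (Python) =====
-- def solve(fruits, k, capacity):
--     goods = []
--
--     for cost, size, count in fruits:
--         while count > 0:
--             # 每个篮子装几个
--             take = min(capacity // size, count)
--             if take == 0:
--                 break
--
--             # 可以装几个篮子
--             fill = count // take
--             # (waste capacity, basket cost, number of such baskets we can fill using this option)
--             goods.append((capacity - take * size, take * cost, fill))
--             count -= fill * take
--
--     res = 0
--     # 最小浪费，最小花费，最小篮子数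
--     for _, basketCost, fill in sorted(goods):
--         realFill = min(k, fill)
--         res += basketCost * realFill
--         k -= realFill
--         if k == 0:
--             break
--
--     return res
-- ===== SOURCE B (Python) =====
-- def solve(fruits, k, capacity):
--     # Closed-form option generation (no while loop): per fruit at most two
--     # basket tiers; selection by repeated min-extraction with early stop
--     # instead of sorting the whole option list.
--     options = []
--     for cost, size, count in fruits:
--         if count > 0:
--             take = min(capacity // size, count)
--             if take != 0:
--                 fill = count // take
--                 options.append((capacity - take * size, take * cost, fill))
--                 r = count - fill * take
--                 if r > 0:
--                     options.append((capacity - r * size, r * cost, 1))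
--     res = 0
--     while options:
--         best = min(options)
--         options.remove(best)
--         realFill = min(k, best[2])
--         res += best[1] * realFill
--         k -= realFill
--         if k == 0:
--             break
--     return res
-- ===== Notes on version B (the rewrite author's own statement) =====
-- stated objective: alternative
-- what changed: B replaces A's per-fruit while loop by a closed-form two-tier option formula (take = min(capacity//size, count) tier plus an optional remainder tier) and replaces sorting the whole option list by repeated min-extraction that stops as soon as k baskets are consumed.
import Mathlib
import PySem

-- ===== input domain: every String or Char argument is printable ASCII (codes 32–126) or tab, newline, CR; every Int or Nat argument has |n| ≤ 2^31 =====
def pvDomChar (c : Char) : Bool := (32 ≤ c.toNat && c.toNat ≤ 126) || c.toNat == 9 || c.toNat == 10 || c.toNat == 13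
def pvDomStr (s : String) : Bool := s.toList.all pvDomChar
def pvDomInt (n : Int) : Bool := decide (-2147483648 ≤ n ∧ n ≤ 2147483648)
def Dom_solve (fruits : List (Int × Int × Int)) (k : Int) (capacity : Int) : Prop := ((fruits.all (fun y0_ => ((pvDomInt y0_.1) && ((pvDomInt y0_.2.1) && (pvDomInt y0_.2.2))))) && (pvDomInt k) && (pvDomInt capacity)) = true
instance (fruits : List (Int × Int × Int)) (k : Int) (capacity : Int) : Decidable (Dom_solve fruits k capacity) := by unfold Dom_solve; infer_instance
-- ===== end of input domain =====

-- B replaces A's per-fruit while loop by a closed-form two-tier generation and replaces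
-- full sorting by repeated min-extraction that stops as soon as k is exhausted (objective: alternative).

-- lexKey models Python's lexicographic comparison of int 3-tuples (what sorted/min use on tuples)
def lexKey (t : Int × Int × Int) : Int ×ₗ (Int ×ₗ Int) := toLex (t.1, toLex (t.2.1, t.2.2))

-- ===== PORT A =====
-- termination helper for A's while loop, cited in decreasing_by
theorem genDec (count take : Int) (hc : 0 < count) (ht : ¬ take = 0) (hle : take ≤ count) :
    (count - PySem.Int.floordiv count take * take).toNat < count.toNat := by
  have hmk : PySem.Int.floordiv count take * take + PySem.Int.mod count take = count :=
    PySem.Int.floordiv_mul_add_mod count take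
  rcases lt_trichotomy take 0 with h | h | h
  · have := PySem.Int.mod_neg_bounds count h
    omega
  · exact absurd h ht
  · have h1 := PySem.Int.mod_nonneg count h
    have h2 := PySem.Int.mod_lt count h
    omega

-- the body of A's 'while count > 0' loop (appends to goods, mutates count)
def genFruit (cost size capacity : Int) (count : Int) (acc : List (Int × Int × Int)) :
    List (Int × Int × Int) :=
  if hc : 0 < count then
    let take := min (PySem.Int.floordiv capacity size) count
    if ht : take = 0 then acc
    else
      let fill := PySem.Int.floordiv count take
      genFruit cost size capacity (count - fill * take)
        (acc ++ [(capacity - take * size, take * cost, fill)])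
  else acc
termination_by count.toNat
decreasing_by exact genDec count (min (PySem.Int.floordiv capacity size) count) hc ht (min_le_right _ _)

-- A's result loop over sorted goods, with its break
def selA : List (Int × Int × Int) → Int → Int → Int
  | [], _, res => res
  | g :: t, k, res =>
    let realFill := min k g.2.2
    let res' := res + g.2.1 * realFill
    let k' := k - realFill
    if k' = 0 then res' else selA t k' res'

def solve (fruits : List (Int × Int × Int)) (k : Int) (capacity : Int) : Int :=
  let goods := fruits.foldl (fun acc f => genFruit f.1 f.2.1 capacity f.2.2 acc) []
  selA (PySem.List.sorted goods lexKey) k 0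

-- ===== PORT B =====
-- closed-form per-fruit option generation (at most two tiers, no loop)
def tiers (cost size count capacity : Int) : List (Int × Int × Int) :=
  if 0 < count then
    let take := min (PySem.Int.floordiv capacity size) count
    if take = 0 then []
    else
      let fill := PySem.Int.floordiv count take
      let r := count - fill * take
      (capacity - take * size, take * cost, fill) ::
        (if 0 < r then [(capacity - r * size, r * cost, 1)] else [])
  else []

-- termination helper for B's pop-the-minimum loop, cited in decreasing_by
theorem selBDec {l rest : List (Int × Int × Int)} {m : Int × Int × Int}
    (h : PySem.List.min? l lexKey = some m) (h2 : PySem.List.remove? l m = some rest) :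
    rest.length < l.length := by
  have hm : m ∈ l := PySem.List.min?_mem h
  rw [PySem.List.remove?_eq_some_erase l m hm] at h2
  cases h2
  have := List.length_erase_of_mem hm
  have : 0 < l.length := List.length_pos_of_mem hm
  omega

-- B's selection: best = min(options); options.remove(best); stop when k hits 0
def selB (l : List (Int × Int × Int)) (k res : Int) : Int :=
  match h : PySem.List.min? l lexKey with
  | none => res
  | some m =>
    match h2 : PySem.List.remove? l m with
    | none => res   -- unreachable: the minimum is a member of the list
    | some rest =>
      let realFill := min k m.2.2
      let res' := res + m.2.1 * realFill
      let k' := k - realFill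
      if k' = 0 then res' else selB rest k' res'
termination_by l.length
decreasing_by exact selBDec h h2

def solve_alt (fruits : List (Int × Int × Int)) (k : Int) (capacity : Int) : Int :=
  let options := fruits.foldl (fun acc f => acc ++ tiers f.1 f.2.1 f.2.2 capacity) []
  selB options k 0

-- ===== PRECONDITION & SPEC =====
-- Pre_ excludes exactly the inputs where Python A raises ZeroDivisionError:
-- a fruit with size = 0 and a positive count (its while loop divides by size).
def Pre_solve (fruits : List (Int × Int × Int)) (k : Int) (capacity : Int) : Prop :=
  ∀ x ∈ fruits, x.2.1 = 0 → x.2.2 ≤ 0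
instance (fruits : List (Int × Int × Int)) (k : Int) (capacity : Int) : Decidable (Pre_solve fruits k capacity) := by unfold Pre_solve; infer_instance
def pvWitness_solve : (List (Int × Int × Int)) × Int × Int := ([(5, 2, 7), (3, 4, 3)], 3, 10)

def Spec_solve (fruits : List (Int × Int × Int)) (k : Int) (capacity : Int) (out : Int) : Prop := out = solve_alt fruits k capacity
instance (fruits : List (Int × Int × Int)) (k : Int) (capacity : Int) (out : Int) : Decidable (Spec_solve fruits k capacity out) := by unfold Spec_solve; infer_instance

-- ===== CLAIM (what is proved, stated in full; the proofs are below) =====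
def Claim_equal_solve : Prop := ∀ (fruits : List (Int × Int × Int)) (k : Int) (capacity : Int), Dom_solve fruits k capacity → Pre_solve fruits k capacity → Spec_solve fruits k capacity (solve fruits k capacity)

-- ===== LEMMAS AND PROOFS =====
theorem lexKey_inj : Function.Injective lexKey := by
  intro a b h
  obtain ⟨a1, a2, a3⟩ := a; obtain ⟨b1, b2, b3⟩ := b
  simpa [lexKey, toLex, Prod.ext_iff] using h

-- A's while loop produces exactly B's two closed-form tiers
theorem genFruit_eq_tiers (cost size capacity count : Int) (acc : List (Int × Int × Int)) :
    genFruit cost size capacity count acc = acc ++ tiers cost size count capacity := by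
  by_cases hc : 0 < count
  · rw [genFruit, tiers]
    set q := PySem.Int.floordiv capacity size with hq
    set take := min q count with htake
    by_cases ht : take = 0
    · simp [hc, ht]
    · simp only [hc, dif_pos, if_pos, ht, dite_false]
      set fill := PySem.Int.floordiv count take with hfill
      set r := count - fill * take with hr
      have hmk : fill * take + PySem.Int.mod count take = count :=
        PySem.Int.floordiv_mul_add_mod count take
      have hrmod : r = PySem.Int.mod count take := by omega
      have htle : take ≤ count := min_le_right _ _
      rcases lt_trichotomy take 0 with hts | hts | hts
      · -- negative take: remainder r ≤ 0, single tier, loop exits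
        have hb := PySem.Int.mod_neg_bounds count hts
        rw [genFruit]
        have : ¬ 0 < r := by omega
        simp [this]
      · exact absurd hts ht
      · -- positive take
        have h1 := PySem.Int.mod_nonneg count hts
        have h2 := PySem.Int.mod_lt count hts
        by_cases hr0 : 0 < r
        · -- remainder tier: second loop iteration takes exactly r
          have hrq : r ≤ q := by
            have : take ≤ q := min_le_left _ _
            omega
          rw [genFruit]
          rw [dif_pos (show 0 < count - fill * take by omega)]
          have hmin2 : min q (count - fill * take) = count - fill * take := by
            apply min_eq_right; omega
          rw [hmin2]
          have hne2 : ¬ (count - fill * take = 0) := by omega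
          simp only [hne2, dite_false]
          have hfd : PySem.Int.floordiv (count - fill * take) (count - fill * take) = 1 := by
            rw [PySem.Int.floordiv_eq_ediv_of_pos (by omega)]
            exact Int.ediv_self (by omega)
          rw [hfd]
          rw [genFruit]
          simp [hr0, ← hr]
        · -- no remainder: loop exits after the first tier
          rw [genFruit]
          simp [hr0]
  · rw [genFruit, tiers]
    simp [hc]

-- the first minimum heads the sorted list
theorem sorted_cons_min {l : List (Int × Int × Int)} {m : Int × Int × Int}
    (h : PySem.List.min? l lexKey = some m) :
    PySem.List.sorted l lexKey = m :: PySem.List.sorted (l.erase m) lexKey := by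
  have hm : m ∈ l := PySem.List.min?_mem h
  apply PySem.List.eq_of_perm_of_pairwise_le_of_injective lexKey lexKey_inj
  · exact (PySem.List.sorted_perm l lexKey false).trans
      ((List.perm_cons_erase hm).trans
        (List.Perm.cons m (PySem.List.sorted_perm (l.erase m) lexKey false).symm))
  · exact PySem.List.sorted_pairwise l lexKey
  · constructor
    · intro y hy
      exact PySem.List.min?_isMin h y
        (List.mem_of_mem_erase ((PySem.List.mem_sorted (l.erase m) lexKey false y).1 hy))
    · exact PySem.List.sorted_pairwise (l.erase m) lexKey

-- min-extraction equals iterating over the sorted list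
theorem selB_eq_selA (n : Nat) (l : List (Int × Int × Int)) (hn : l.length ≤ n) (k res : Int) :
    selB l k res = selA (PySem.List.sorted l lexKey) k res := by
  induction n generalizing l k res with
  | zero =>
    have hl : l = [] := List.eq_nil_of_length_eq_zero (by omega)
    subst hl
    rw [selB]
    split
    · rfl
    · rename_i m hmin
      exact absurd (PySem.List.min?_mem hmin) (by simp)
  | succ n ih =>
    rw [selB]
    split
    · rename_i hmin
      have hl : l = [] := (PySem.List.min?_eq_none_iff l lexKey).1 hmin
      subst hl
      rfl
    · rename_i m hmin
      have hm : m ∈ l := PySem.List.min?_mem hmin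
      have hrem : PySem.List.remove? l m = some (l.erase m) :=
        PySem.List.remove?_eq_some_erase l m hm
      split
      · rename_i h2
        rw [hrem] at h2
        cases h2
      · rename_i rest h2
        rw [hrem] at h2
        injection h2 with h2
        subst h2
        rw [sorted_cons_min hmin, selA]
        by_cases hk : k - min k m.2.2 = 0
        · simp [hk]
        · simp only [hk, if_false]
          exact ih (l.erase m)
            (by have := List.length_erase_of_mem hm
                have := List.length_pos_of_mem hm
                omega) _ _

-- ===== VERDICT (by name: the statement is the Claim_ definition above) =====
theorem solve_spec : Claim_equal_solve := by
  intro fruits k capacity _ _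
  unfold Spec_solve
  show selA (PySem.List.sorted
      (fruits.foldl (fun acc f => genFruit f.1 f.2.1 capacity f.2.2 acc) []) lexKey) k 0 =
    selB (fruits.foldl (fun acc f => acc ++ tiers f.1 f.2.1 f.2.2 capacity) []) k 0
  rw [PySem.List.foldl_congr_mem fruits
    (fun acc f => genFruit f.1 f.2.1 capacity f.2.2 acc)
    (fun acc f => acc ++ tiers f.1 f.2.1 f.2.2 capacity) []
    (fun acc f _ => genFruit_eq_tiers f.1 f.2.1 capacity f.2.2 acc)]
  exact (selB_eq_selA _ _ le_rfl k 0).symm
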